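-- pv_equiv track=rewrite | github.com/wlsgh7608/TIL | algorithm/greedy/programmers/구명보트.py | wrong_solution
-- ===== SOURCE A (Python) =====
-- def wrong_solution(people, limit):
--     answer = 0
--
--     people.sort(reverse=True)
--     cnt = 0
--     not_rescure = [True for _ in range(len(people))]
--
--     sec_idx = 0
--     # 무거운 사람 먼저
--     while True in not_rescure: #O(n)
--         idx = not_rescure.index(True)
--         cur_limit = limit - people[idx]
--         not_rescure[idx]  = False
--
--         idx+=1
--         while idx < len(people): #O(n)
--             if not_rescure[idx] and people[idx] <= cur_limit:
--                 cur_limit -= people[idx]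
--                 not_rescure[idx] = False
--             idx+=1
--         cnt+=1
--     return cnt
-- ===== SOURCE B (Python) =====
-- def wrong_solution(people, limit):
--     # One pass over the descending-sorted people: first-fit each person into a
--     # growing list of open-boat capacities (sorts `people` in place, like A).
--     people.sort(reverse=True)
--     boats = []
--     for x in people:
--         for i in range(len(boats)):
--             if x <= boats[i]:
--                 boats[i] -= x
--                 break
--         else:
--             boats.append(limit - x)
--     return len(boats)
-- ===== Notes on version B (the rewrite author's own statement) =====
-- stated objective: alternative
-- what changed: Replaced A's staged per-boat passes (a rescued-flag array rescanned in full once per boat) by a single pass over the sorted people that first-fits each person into a growing accumulator of open-boat capacities.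
import Mathlib
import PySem

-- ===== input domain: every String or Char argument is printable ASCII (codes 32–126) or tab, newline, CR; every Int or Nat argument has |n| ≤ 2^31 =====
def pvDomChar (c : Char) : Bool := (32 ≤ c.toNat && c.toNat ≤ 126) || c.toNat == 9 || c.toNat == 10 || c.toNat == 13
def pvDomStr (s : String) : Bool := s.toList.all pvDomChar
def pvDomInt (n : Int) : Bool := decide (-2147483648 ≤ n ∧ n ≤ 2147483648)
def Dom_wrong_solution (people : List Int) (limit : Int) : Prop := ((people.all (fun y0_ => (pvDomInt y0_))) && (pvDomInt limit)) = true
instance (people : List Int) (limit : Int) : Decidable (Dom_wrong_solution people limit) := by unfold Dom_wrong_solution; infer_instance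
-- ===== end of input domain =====

-- B replaces A's per-boat rescans of a rescued-flag array by ONE pass over the
-- descending-sorted people, first-fitting each person into a growing list of
-- open-boat capacities; both Pythons sort `people` in place — the equivalence
-- proved is about the RETURN value only.

-- ===== PORT A =====
-- inner while: idx scans people[idx..], unrescued fitting people are taken
def innerA (ps : List Int) (flags : List Bool) (idx : Nat) (cap : Int) : List Bool × Int :=
  if _h : idx < ps.length then
    -- people[idx]/not_rescure[idx] are in range here, so getD equals Python's indexing
    if flags.getD idx false && decide (ps.getD idx 0 ≤ cap) then
      innerA ps (flags.set idx false) (idx + 1) (cap - ps.getD idx 0)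
    else
      innerA ps flags (idx + 1) cap
  else (flags, cap)
termination_by ps.length - idx

-- outer while, with fuel as a totality guard (the loop runs at most ps.length times)
def outerA (ps : List Int) (limit : Int) (flags : List Bool) (cnt : Int) : Nat → Int
  | 0 => cnt
  | fuel + 1 =>
    if true ∈ flags then
      match PySem.List.index? flags true with
      | some idx =>
          let cap := limit - ps.getD idx 0
          let flags1 := flags.set idx false
          let st := innerA ps flags1 (idx + 1) cap
          outerA ps limit st.1 (cnt + 1) fuel
      | none => cnt
    else cnt

def wrong_solution (people : List Int) (limit : Int) : Int :=
  let ps := PySem.List.sorted people (fun x => x) true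
  outerA ps limit (List.replicate ps.length true) 0 ps.length

-- ===== PORT B =====
-- the inner for-with-break: first open boat with enough capacity takes x
def tryPlace (x : Int) : List Int → Option (List Int)
  | [] => none
  | c :: cs => if x ≤ c then some ((c - x) :: cs) else (tryPlace x cs).map (c :: ·)

-- one item of the single pass: place x, or open a new boat at the end
def stepB (limit : Int) (boats : List Int) (x : Int) : List Int :=
  match tryPlace x boats with
  | some b => b
  | none => boats ++ [limit - x]

def wrong_solution_alt (people : List Int) (limit : Int) : Int :=
  ((PySem.List.sorted people (fun x => x) true).foldl (stepB limit) []).length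

-- ===== PRECONDITION & SPEC =====
def Spec_wrong_solution (people : List Int) (limit : Int) (out : Int) : Prop := out = wrong_solution_alt people limit
instance (people : List Int) (limit : Int) (out : Int) : Decidable (Spec_wrong_solution people limit out) := by unfold Spec_wrong_solution; infer_instance

-- ===== CLAIM (what is proved, stated in full; the proofs are below) =====
def Claim_equal_wrong_solution : Prop := ∀ (people : List Int) (limit : Int), Dom_wrong_solution people limit → Spec_wrong_solution people limit (wrong_solution people limit)

-- ===== LEMMAS AND PROOFS =====

-- Proof-only intermediate form of A (per-boat survivor partition): fillB is the
-- leftover after one boat's pass, takeCapP its final capacity, loopB the boat count.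
def fillB (cap : Int) : List Int → List Int
  | [] => []
  | x :: xs => if x ≤ cap then fillB (cap - x) xs else x :: fillB cap xs

def takeCapP (cap : Int) : List Int → Int
  | [] => cap
  | x :: xs => if x ≤ cap then takeCapP (cap - x) xs else takeCapP cap xs

theorem fillB_length_le (cap : Int) (xs : List Int) : (fillB cap xs).length ≤ xs.length := by
  induction xs generalizing cap with
  | nil => simp [fillB]
  | cons x xs ih =>
    simp only [fillB]
    split
    · exact Nat.le_succ_of_le (ih _)
    · simpa using ih cap

def loopB (limit : Int) : List Int → Int
  | [] => 0
  | x :: xs => loopB limit (fillB (limit - x) xs) + 1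
termination_by xs => xs.length
decreasing_by exact Nat.lt_succ_of_le (fillB_length_le _ _)

-- the survivors of a flag assignment, in order
def mask : List Int → List Bool → List Int
  | x :: ps, true :: fs => x :: mask ps fs
  | _ :: ps, false :: fs => mask ps fs
  | _, _ => []

theorem mask_nil_right (ps : List Int) : mask ps [] = [] := by cases ps <;> rfl

theorem mask_append (a c : List Int) (b d : List Bool) (h : a.length = b.length) :
    mask (a ++ c) (b ++ d) = mask a b ++ mask c d := by
  induction a generalizing b with
  | nil =>
    cases b with
    | nil => simp [mask]
    | cons bh bt => simp at h
  | cons x xs ih =>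
    cases b with
    | nil => simp at h
    | cons bh bt =>
      cases bh <;> simp [mask, ih bt (by simpa using h)]

theorem mask_of_not_mem_true (ps : List Int) (fs : List Bool) (h : true ∉ fs) :
    mask ps fs = [] := by
  induction fs generalizing ps with
  | nil => exact mask_nil_right ps
  | cons b bt ih =>
    cases ps with
    | nil => rfl
    | cons x xs =>
      cases b with
      | false => exact ih xs (by simpa using h)
      | true => simp at h

theorem mask_replicate_true (ps : List Int) : mask ps (List.replicate ps.length true) = ps := by
  induction ps with
  | nil => rfl
  | cons x xs ih => simp [List.replicate, mask, ih]

theorem getD_append_cons {α : Type} (a : List α) (x : α) (b : List α) (d : α) :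
    (a ++ x :: b).getD a.length d = x := by
  induction a with
  | nil => rfl
  | cons y ys _ => simp

theorem set_append_cons {α : Type} (a : List α) (x : α) (b : List α) (y : α) :
    (a ++ x :: b).set a.length y = a ++ y :: b := by
  induction a with
  | nil => rfl
  | cons z zs ih => simp [ih]

-- inner while, re-expressed structurally on the suffix past idx
def innerL : List Int → List Bool → Int → List Bool × Int
  | p :: ps, f :: fs, cap =>
    if f && decide (p ≤ cap) then
      let r := innerL ps fs (cap - p); (false :: r.1, r.2)
    else
      let r := innerL ps fs cap; (f :: r.1, r.2)
  | _, fs, cap => (fs, cap)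

theorem innerL_length (ps : List Int) (fs : List Bool) (cap : Int) :
    (innerL ps fs cap).1.length = fs.length := by
  induction ps generalizing fs cap with
  | nil => cases fs <;> rfl
  | cons p pt ih =>
    cases fs with
    | nil => rfl
    | cons f ft =>
      simp only [innerL]
      split <;> simp [ih]

theorem innerL_mask (ps : List Int) (fs : List Bool) (cap : Int) (h : ps.length = fs.length) :
    mask ps (innerL ps fs cap).1 = fillB cap (mask ps fs) := by
  induction ps generalizing fs cap with
  | nil =>
    cases fs with
    | nil => rfl
    | cons f ft => simp at h
  | cons p pt ih =>
    cases fs with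
    | nil => simp at h
    | cons f ft =>
      have h' : pt.length = ft.length := by simpa using h
      cases f with
      | true =>
        by_cases hc : p ≤ cap
        · simp only [innerL]
          rw [if_pos (by simp [hc])]
          simp only [mask, fillB, if_pos hc]
          exact ih ft (cap - p) h'
        · simp only [innerL]
          rw [if_neg (by simp [hc])]
          simp only [mask, fillB, if_neg hc]
          rw [ih ft cap h']
      | false =>
        simp only [innerL]
        rw [if_neg (by simp)]
        simp only [mask]
        exact ih ft cap h'

theorem innerA_eq_innerL (ps₂ : List Int) :
    ∀ (fs₂ : List Bool) (pre : List Int) (pf : List Bool) (cap : Int),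
      pre.length = pf.length → ps₂.length = fs₂.length →
      innerA (pre ++ ps₂) (pf ++ fs₂) pre.length cap
        = (pf ++ (innerL ps₂ fs₂ cap).1, (innerL ps₂ fs₂ cap).2) := by
  induction ps₂ with
  | nil =>
    intro fs₂ pre pf cap hl h2
    cases fs₂ with
    | nil =>
      unfold innerA
      rw [dif_neg (by simp)]
      simp [innerL]
    | cons f ft => simp at h2
  | cons p pt ih =>
    intro fs₂ pre pf cap hl h2
    cases fs₂ with
    | nil => simp at h2
    | cons f ft =>
      have h2' : pt.length = ft.length := by simpa using h2
      unfold innerA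
      rw [dif_pos (by simp)]
      have hgp : (pre ++ p :: pt).getD pre.length 0 = p := getD_append_cons pre p pt 0
      have hgf : (pf ++ f :: ft).getD pre.length false = f := by
        rw [hl]; exact getD_append_cons pf f ft false
      rw [hgp, hgf]
      have e1 : pre ++ p :: pt = (pre ++ [p]) ++ pt := by simp
      have e3 : pre.length + 1 = (pre ++ [p]).length := by simp
      cases hfb : (f && decide (p ≤ cap)) with
      | true =>
        rw [if_pos rfl]
        have hset : (pf ++ f :: ft).set pre.length false = (pf ++ [false]) ++ ft := by
          rw [hl, set_append_cons]; simp
        rw [hset, e1, e3,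
          ih ft (pre ++ [p]) (pf ++ [false]) (cap - p) (by simp [hl]) h2']
        simp only [innerL]
        rw [if_pos hfb]
        simp
      | false =>
        rw [if_neg (by simp)]
        have e2 : pf ++ f :: ft = (pf ++ [f]) ++ ft := by simp
        rw [e1, e2, e3, ih ft (pre ++ [p]) (pf ++ [f]) cap (by simp [hl]) h2']
        simp only [innerL]
        rw [if_neg (by simp [hfb])]
        simp

theorem outerA_eq_loopB (ps : List Int) (limit : Int) :
    ∀ fuel (flags : List Bool) (cnt : Int), flags.length = ps.length →
      (mask ps flags).length ≤ fuel →
      outerA ps limit flags cnt fuel = cnt + loopB limit (mask ps flags) := by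
  intro fuel
  induction fuel with
  | zero =>
    intro flags cnt hlen hle
    have : mask ps flags = [] := List.eq_nil_of_length_eq_zero (by omega)
    simp [outerA, this, loopB]
  | succ fuel ih =>
    intro flags cnt hlen hle
    unfold outerA
    by_cases hmem : true ∈ flags
    · rw [if_pos hmem]
      obtain ⟨k, hk⟩ := Option.isSome_iff_exists.mp ((PySem.List.index?_isSome_iff _ _).mpr hmem)
      rw [hk]
      obtain ⟨pre, suf, hfl, hprelen, hnotpre⟩ := (PySem.List.index?_eq_some_iff _ _ _).mp hk
      have hkf : k < flags.length := by rw [hfl]; simp; omega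
      have hkp : k < ps.length := by omega
      have hsuflen : suf.length = flags.length - (k + 1) := by
        rw [hfl]; simp; omega
      have hlenpsa : (ps.take k).length = k := by simp; omega
      obtain ⟨pk, pd, hps⟩ : ∃ pk pd, ps = ps.take k ++ pk :: pd :=
        ⟨ps[k], ps.drop (k + 1), by rw [← List.drop_eq_getElem_cons hkp, List.take_append_drop]⟩
      have hpdlen : pd.length = suf.length := by
        have := congrArg List.length hps
        simp [hlenpsa] at this
        omega
      have hgd : ps.getD k 0 = pk := by
        have h0 := getD_append_cons (ps.take k) pk pd 0
        rw [hlenpsa] at h0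
        rw [hps]
        exact h0
      have hset : flags.set k false = (pre ++ [false]) ++ suf := by
        rw [hfl, ← hprelen, set_append_cons]; simp
      have hinner : innerA ps (flags.set k false) (k + 1) (limit - ps.getD k 0)
          = ((pre ++ [false]) ++ (innerL pd suf (limit - pk)).1,
             (innerL pd suf (limit - pk)).2) := by
        rw [hgd, hset]
        conv_lhs => rw [hps]
        have e1 : ps.take k ++ pk :: pd = (ps.take k ++ [pk]) ++ pd := by simp
        have e3 : k + 1 = (ps.take k ++ [pk]).length := by simp [hlenpsa]
        rw [e1, e3, innerA_eq_innerL pd suf (ps.take k ++ [pk])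
          (pre ++ [false]) (limit - pk) (by simp [hlenpsa, hprelen]) (by omega)]
      have hmask1 : mask ps (innerA ps (flags.set k false) (k + 1) (limit - ps.getD k 0)).1
          = fillB (limit - pk) (mask pd suf) := by
        rw [hinner]
        conv_lhs => rw [hps]
        have e1 : ps.take k ++ pk :: pd = (ps.take k ++ [pk]) ++ pd := by simp
        rw [e1, mask_append _ _ _ _ (by simp [hlenpsa, hprelen])]
        rw [mask_of_not_mem_true _ _ (by
          intro h
          rcases List.mem_append.mp h with h | h
          · exact hnotpre h
          · simp at h)]
        rw [innerL_mask _ _ _ (by omega)]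
        simp
      have hmask0 : mask ps flags = pk :: mask pd suf := by
        conv_lhs => rw [hps, hfl]
        rw [mask_append _ _ _ _ (by omega), mask_of_not_mem_true _ _ hnotpre]
        simp [mask]
      have hstlen : (innerA ps (flags.set k false) (k + 1) (limit - ps.getD k 0)).1.length
          = ps.length := by
        rw [hinner]
        simp [innerL_length]
        omega
      show outerA ps limit (innerA ps (flags.set k false) (k + 1) (limit - ps.getD k 0)).1
          (cnt + 1) fuel = cnt + loopB limit (mask ps flags)
      rw [ih _ _ hstlen (by
        rw [hmask1]
        have h1 := fillB_length_le (limit - pk) (mask pd suf)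
        have h2 : (mask ps flags).length = (mask pd suf).length + 1 := by
          rw [hmask0]; simp
        omega)]
      rw [hmask1, hmask0]
      conv_rhs => rw [loopB]
      ring
    · rw [if_neg hmem]
      rw [mask_of_not_mem_true _ _ hmem]
      simp [loopB]

-- first-fit never touches a head that does not fit
theorem stepB_cons (limit c x : Int) (bs : List Int) :
    stepB limit (c :: bs) x = if x ≤ c then (c - x) :: bs else c :: stepB limit bs x := by
  by_cases h : x ≤ c
  · simp [stepB, tryPlace, h]
  · simp only [stepB, tryPlace, if_neg h]
    cases tryPlace x bs <;> simp

-- the head boat of the fold collects exactly fillB's picks; the rest of the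
-- items reach the remaining boats in order
theorem foldl_stepB_cons (limit : Int) (ds : List Int) :
    ∀ (c : Int) (bs : List Int),
      ds.foldl (stepB limit) (c :: bs) = takeCapP c ds :: (fillB c ds).foldl (stepB limit) bs := by
  induction ds with
  | nil => intro c bs; simp [takeCapP, fillB]
  | cons x xs ih =>
    intro c bs
    by_cases h : x ≤ c
    · simp only [List.foldl, stepB_cons, if_pos h, takeCapP, fillB, ih]
    · simp only [List.foldl, stepB_cons, if_neg h, takeCapP, fillB, ih]

theorem loopB_eq_foldl (limit : Int) (ds : List Int) :
    loopB limit ds = ((ds.foldl (stepB limit) []).length : Int) := by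
  induction hn : ds.length using Nat.strong_induction_on generalizing ds with
  | _ n ih =>
    cases ds with
    | nil => simp [loopB]
    | cons x xs =>
      have hstep : ([] : List Int).foldl (stepB limit) (stepB limit [] x) = [limit - x] := rfl
      have : (x :: xs).foldl (stepB limit) [] = xs.foldl (stepB limit) [limit - x] := rfl
      rw [loopB, this, foldl_stepB_cons]
      have hlt : (fillB (limit - x) xs).length < n := by
        have := fillB_length_le (limit - x) xs
        simp at hn
        omega
      rw [ih _ hlt _ rfl]
      simp

-- ===== VERDICT (by name: the statement is the Claim_ definition above) =====
theorem wrong_solution_spec : Claim_equal_wrong_solution := by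
  intro people limit _
  unfold Spec_wrong_solution wrong_solution wrong_solution_alt
  rw [outerA_eq_loopB _ limit _ (List.replicate _ true) 0 (by simp)
    (by rw [mask_replicate_true]), mask_replicate_true]
  rw [loopB_eq_foldl]
  ring
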